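-- pv_equiv track=rewrite | github.com/exc33ded/GFG-Practice | Medium/Arranging the array/arranging-the-array.py | Rearrange
-- ===== SOURCE A (Python) =====
-- from typing import List
--
-- def Rearrange(n : int, arr : List[int]) -> None:
--     # code here
--     p = []
--     n = []
--     for num in arr:
--         if num >= 0:
--             p.append(num)
--         else:
--             n.append(num)
--
--     arr[:] = n + p
--     del p, n
--
--     return arr
-- ===== SOURCE B (Python) =====
-- from typing import List
--
-- def Rearrange(n : int, arr : List[int]) -> None:
--     # stable sort keyed on sign: negatives (key False) come first, order preserved
--     arr[:] = sorted(arr, key=lambda x: x >= 0)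
--     return arr
-- ===== Notes on version B (the rewrite author's own statement) =====
-- stated objective: idiomatic
-- what changed: Replaced the two explicit buckets and concatenation with a single stable sort keyed on the sign (sorted(arr, key=lambda x: x >= 0)), relying on sort stability to keep each group's original order.
import Mathlib
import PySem

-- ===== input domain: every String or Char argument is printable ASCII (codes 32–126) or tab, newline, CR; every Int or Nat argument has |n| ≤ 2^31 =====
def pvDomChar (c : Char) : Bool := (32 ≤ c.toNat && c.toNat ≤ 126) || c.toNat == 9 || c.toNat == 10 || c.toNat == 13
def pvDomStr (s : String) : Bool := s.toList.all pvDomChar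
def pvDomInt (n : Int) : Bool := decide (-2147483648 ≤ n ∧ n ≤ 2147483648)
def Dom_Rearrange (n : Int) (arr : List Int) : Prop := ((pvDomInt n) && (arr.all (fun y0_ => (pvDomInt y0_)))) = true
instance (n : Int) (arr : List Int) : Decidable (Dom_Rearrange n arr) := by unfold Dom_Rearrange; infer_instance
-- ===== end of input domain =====

-- B replaces A's two explicit buckets + concatenation by a single stable sort keyed on the
-- sign (idiomatic, not faster); A mutates `arr` in place and B performs the same `arr[:] = …`
-- mutation — the equivalence proved here is about the RETURN value.

-- ===== PORT A =====
-- one pass over arr, appending to bucket p (num >= 0) or n (num < 0), result n ++ p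
def Rearrange (n : Int) (arr : List Int) : List Int :=
  let pn : List Int × List Int :=
    arr.foldl (fun s num => if num ≥ 0 then (s.1 ++ [num], s.2) else (s.1, s.2 ++ [num]))
      ([], [])
  pn.2 ++ pn.1

-- ===== PORT B =====
-- sorted(arr, key=lambda x: x >= 0): Python's bool key (False < True) is Lean's Bool order
def Rearrange_alt (n : Int) (arr : List Int) : List Int :=
  PySem.List.sorted arr (fun x => decide (0 ≤ x)) false

-- ===== PRECONDITION & SPEC =====
def Spec_Rearrange (n : Int) (arr : List Int) (out : List Int) : Prop := out = Rearrange_alt n arr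
instance (n : Int) (arr : List Int) (out : List Int) : Decidable (Spec_Rearrange n arr out) := by unfold Spec_Rearrange; infer_instance

-- ===== CLAIM (what is proved, stated in full; the proofs are below) =====
def Claim_equal_Rearrange : Prop := ∀ (n : Int) (arr : List Int), Dom_Rearrange n arr → Spec_Rearrange n arr (Rearrange n arr)

-- ===== LEMMAS AND PROOFS =====

-- A's single pass computes (non-negatives of xs, negatives of xs), each in original order
theorem rearrange_foldl_filter (xs : List Int) (p q : List Int) :
    xs.foldl (fun (s : List Int × List Int) num =>
        if num ≥ 0 then (s.1 ++ [num], s.2) else (s.1, s.2 ++ [num])) (p, q)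
      = (p ++ xs.filter (fun x => decide (0 ≤ x)), q ++ xs.filter (fun x => decide (x < 0))) := by
  induction xs generalizing p q with
  | nil => simp
  | cons x t ih =>
    by_cases h : (0:Int) ≤ x
    · simp [List.foldl_cons, h, ih, not_lt.mpr h]
    · simp [List.foldl_cons, h, ih, lt_of_not_ge h]

-- one unfolding step of PySem's insertion
theorem insertBy_cons (before : Int → Int → Bool) (x y : Int) (ys : List Int) :
    PySem.List.insertBy before x (y :: ys)
      = if before x y then x :: y :: ys else y :: PySem.List.insertBy before x ys := rfl

-- inserting past a prefix the element is not "before"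
theorem insertBy_append_of_forall_not_before (before : Int → Int → Bool) (x : Int)
    (l r : List Int) (h : ∀ y ∈ l, before x y = false) :
    PySem.List.insertBy before x (l ++ r) = l ++ PySem.List.insertBy before x r := by
  induction l with
  | nil => rfl
  | cons y t ih =>
    have hy : before x y = false := h y (by simp)
    rw [List.cons_append, insertBy_cons, hy, ih (fun z hz => h z (by simp [hz]))]
    simp

-- B's insertion sort with the sign key builds exactly negatives ++ non-negatives
theorem sorted_sign_eq_partition (xs : List Int) :
    PySem.List.sorted xs (fun x => decide (0 ≤ x)) false
      = xs.filter (fun x => decide (x < 0)) ++ xs.filter (fun x => decide (0 ≤ x)) := by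
  rw [PySem.List.sorted_eq_foldl_insertBy]
  induction xs using List.reverseRecOn with
  | nil => rfl
  | append_singleton t x ih =>
    rw [List.foldl_append, List.foldl_cons, List.foldl_nil, ih]
    set before : Int → Int → Bool :=
      fun a b => decide ((decide (0 ≤ a) : Bool) < (decide (0 ≤ b) : Bool)) with hbef
    by_cases hx : (0:Int) ≤ x
    · -- key x = true: x is not before anything; it goes to the very end
      have hall : ∀ y ∈ t.filter (fun x => decide (x < 0)) ++ t.filter (fun x => decide (0 ≤ x)),
          before x y = false := by
        intro y _; simp [hbef, hx]
      rw [PySem.List.insertBy_of_forall_not_before _ _ _ hall]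
      simp [hx, not_lt.mpr hx, List.filter_append]
    · -- key x = false: x passes the negative prefix, then lands before every non-negative
      have hneg : ∀ y ∈ t.filter (fun x => decide (x < 0)), before x y = false := by
        intro y hy
        have : y < 0 := by simpa using (List.of_mem_filter hy)
        simp [hbef, hx, not_le.mpr this]
      rw [insertBy_append_of_forall_not_before _ _ _ _ hneg]
      have hpos : PySem.List.insertBy before x (t.filter (fun x => decide (0 ≤ x)))
          = x :: t.filter (fun x => decide (0 ≤ x)) := by
        cases hc : t.filter (fun x => decide (0 ≤ x)) with
        | nil => rfl
        | cons a s =>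
          have ha : (0:Int) ≤ a := by
            have := List.of_mem_filter (l := t) (p := fun x => decide (0 ≤ x))
              (a := a) (by rw [hc]; simp)
            simpa using this
          simp [PySem.List.insertBy, hbef, hx, ha, Bool.lt_iff]
      rw [hpos]
      simp [hx, lt_of_not_ge hx, List.filter_append]

-- ===== VERDICT (by name: the statement is the Claim_ definition above) =====
theorem Rearrange_spec : Claim_equal_Rearrange := by
  intro n arr _
  unfold Spec_Rearrange Rearrange Rearrange_alt
  rw [sorted_sign_eq_partition, rearrange_foldl_filter]
  simp
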